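-- pv_equiv track=rewrite | github.com/danpla/dpscreenocr | src/ui/ui_common/cfg_key_values_gen.py | gen_cfg_key_vars
-- ===== SOURCE A (Python) =====
-- from collections import OrderedDict, namedtuple
--
-- Var = namedtuple('Var', 'type name value')
--
-- def gen_var_name(key, prefix='', postfix=''):
--     name = prefix
--
--     upcase = prefix != ''
--     for c in key:
--         if c == '_':
--             upcase = True
--         elif upcase:
--             name += c.upper()
--             upcase = False
--         else:
--             name += c
--
--     return name + postfix
--
-- def gen_cfg_key_vars(keys):
--     result = []
--
--     for key in keys:
--         result.append(
--             Var('const char*',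
--                 gen_var_name(key, 'cfgKey'),
--                 '"' + key + '"'))
--
--     return result
-- ===== SOURCE B (Python) =====
-- from collections import namedtuple
--
-- Var = namedtuple('Var', 'type name value')
--
-- def gen_cfg_key_vars(keys):
--     return [Var('const char*',
--                 'cfgKey' + ''.join(seg[:1].upper() + seg[1:]
--                                    for seg in key.split('_')),
--                 '"' + key + '"')
--             for key in keys]
-- ===== Notes on version B (the rewrite author's own statement) =====
-- stated objective: idiomatic
-- what changed: Replaced the char-by-char upcase state machine and append loop by token splitting: split each key on '_', uppercase only the first character of each segment (seg[:1].upper()+seg[1:]), join, and build the result as one list comprehension.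
import Mathlib
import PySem

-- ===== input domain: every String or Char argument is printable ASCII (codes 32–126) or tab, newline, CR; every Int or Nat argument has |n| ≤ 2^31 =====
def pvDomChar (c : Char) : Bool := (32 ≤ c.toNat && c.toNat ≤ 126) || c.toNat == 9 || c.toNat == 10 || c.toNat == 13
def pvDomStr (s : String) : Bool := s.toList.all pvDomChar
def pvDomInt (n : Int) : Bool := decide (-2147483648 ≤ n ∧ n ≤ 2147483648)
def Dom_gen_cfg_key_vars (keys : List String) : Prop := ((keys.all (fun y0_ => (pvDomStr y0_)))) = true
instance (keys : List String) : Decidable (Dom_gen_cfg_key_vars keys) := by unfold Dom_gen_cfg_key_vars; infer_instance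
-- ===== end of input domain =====

-- B replaces A's char-by-char upcase state machine by splitting each key on '_' and
-- uppercasing each segment's first character (idiomatic; same cost, return value only).

-- ===== PORT A =====
def gen_var_name (key pfx pstfx : String) : String :=
  let st := key.toList.foldl
    (fun (st : List Char × Bool) c =>
      if c = '_' then (st.1, true)
      else if st.2 then (st.1 ++ [PySem.Chars.upperChar c], false)
      else (st.1 ++ [c], false))
    (pfx.toList, !pfx.toList.isEmpty)
  String.ofList (st.1 ++ pstfx.toList)

def gen_cfg_key_vars (keys : List String) : List (String × String × String) :=
  keys.foldl
    (fun result key =>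
      result ++ [("const char*",
                  gen_var_name key "cfgKey" "",
                  String.ofList ('"' :: key.toList ++ ['"']))])
    []

-- ===== PORT B =====
-- seg[:1].upper() + seg[1:]
def pvCapFirst (seg : List Char) : List Char :=
  PySem.Chars.upper (seg.take 1) ++ seg.drop 1

def gen_cfg_key_vars_alt (keys : List String) : List (String × String × String) :=
  keys.map (fun key =>
    ("const char*",
     String.ofList ("cfgKey".toList ++
       (PySem.Chars.splitOn key.toList "_".toList).flatMap pvCapFirst),
     String.ofList ('"' :: key.toList ++ ['"'])))

-- ===== PRECONDITION & SPEC =====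
def Spec_gen_cfg_key_vars (keys : List String) (out : List (String × String × String)) : Prop := out = gen_cfg_key_vars_alt keys
instance (keys : List String) (out : List (String × String × String)) : Decidable (Spec_gen_cfg_key_vars keys out) := by unfold Spec_gen_cfg_key_vars; infer_instance

-- ===== CLAIM (what is proved, stated in full; the proofs are below) =====
def Claim_equal_gen_cfg_key_vars : Prop := ∀ (keys : List String), Dom_gen_cfg_key_vars keys → Spec_gen_cfg_key_vars keys (gen_cfg_key_vars keys)

-- ===== LEMMAS AND PROOFS =====

-- A's state machine, output only (up = "uppercase the next non-underscore char")
def pvMachine : List Char → Bool → List Char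
  | [], _ => []
  | c :: cs, up =>
      if c = '_' then pvMachine cs true
      else (if up then PySem.Chars.upperChar c else c) :: pvMachine cs false

-- key.split('_') as a direct structural recursion (pre = current segment so far)
def pvSplit (pre : List Char) : List Char → List (List Char)
  | [] => [pre]
  | c :: cs => if c = '_' then pre :: pvSplit [] cs else pvSplit (pre ++ [c]) cs

theorem pv_foldl_machine (cs : List Char) :
    ∀ (acc : List Char) (up : Bool),
    (cs.foldl
      (fun (st : List Char × Bool) c =>
        if c = '_' then (st.1, true)
        else if st.2 then (st.1 ++ [PySem.Chars.upperChar c], false)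
        else (st.1 ++ [c], false))
      (acc, up)).1 = acc ++ pvMachine cs up := by
  induction cs with
  | nil => intro acc up; simp [pvMachine]
  | cons c cs ih =>
      intro acc up
      by_cases h : c = '_'
      · simp [h, pvMachine, ih]
      · cases up <;> simp [h, pvMachine, ih]

theorem pv_go_eq_split (fuel : Nat) :
    ∀ (l cur : List Char) (accs : List (List Char)), l.length < fuel →
    PySem.Chars.splitOn.go ['_'] fuel l cur accs =
      accs.reverse ++ pvSplit cur.reverse l := by
  induction fuel with
  | zero => intro l _ _ h; omega
  | succ n ih =>
      intro l cur accs h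
      cases l with
      | nil => simp [PySem.Chars.splitOn.go, pvSplit]
      | cons c rest =>
          by_cases hc : c = '_'
          · subst hc
            have : PySem.Chars.splitOn.go ['_'] (n+1) ('_' :: rest) cur accs =
                PySem.Chars.splitOn.go ['_'] n rest [] (cur.reverse :: accs) := by
              simp [PySem.Chars.splitOn.go, List.isPrefixOf]
            rw [this, ih rest [] (cur.reverse :: accs) (by simpa using Nat.lt_of_succ_lt_succ h)]
            simp [pvSplit]
          · have : PySem.Chars.splitOn.go ['_'] (n+1) (c :: rest) cur accs =
                PySem.Chars.splitOn.go ['_'] n rest (c :: cur) accs := by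
              simp [PySem.Chars.splitOn.go, List.isPrefixOf]
              exact fun h => absurd h.symm hc
            rw [this, ih rest (c :: cur) accs (by simpa using Nat.lt_of_succ_lt_succ h)]
            simp [pvSplit, hc]

theorem pv_splitOn_eq (cs : List Char) :
    PySem.Chars.splitOn cs ['_'] = pvSplit [] cs := by
  have := pv_go_eq_split (cs.length + 1) cs [] [] (by omega)
  simpa [PySem.Chars.splitOn] using this

theorem pv_capFirst_snoc (pre : List Char) (c : Char) :
    pvCapFirst (pre ++ [c]) =
      pvCapFirst pre ++ [if pre.isEmpty then PySem.Chars.upperChar c else c] := by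
  cases pre <;> simp [pvCapFirst, PySem.Chars.upper]

theorem pv_flatMap_split (cs : List Char) :
    ∀ (pre : List Char),
    (pvSplit pre cs).flatMap pvCapFirst = pvCapFirst pre ++ pvMachine cs pre.isEmpty := by
  induction cs with
  | nil => intro pre; simp [pvSplit, pvMachine]
  | cons c cs ih =>
      intro pre
      by_cases h : c = '_'
      · simp [pvSplit, h, pvMachine, ih, pvCapFirst, PySem.Chars.upper]
      · simp only [pvSplit, h, if_false, ih, pv_capFirst_snoc, pvMachine]
        cases pre <;> simp

theorem pv_name_eq (key : String) :
    gen_var_name key "cfgKey" "" =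
      String.ofList ("cfgKey".toList ++
        (PySem.Chars.splitOn key.toList "_".toList).flatMap pvCapFirst) := by
  have h2 := pv_flatMap_split key.toList []
  simp [pvCapFirst, PySem.Chars.upper] at h2
  simp [gen_var_name, pv_splitOn_eq, h2, pv_foldl_machine]

-- ===== VERDICT (by name: the statement is the Claim_ definition above) =====
theorem gen_cfg_key_vars_spec : Claim_equal_gen_cfg_key_vars := by
  intro keys _
  unfold Spec_gen_cfg_key_vars gen_cfg_key_vars gen_cfg_key_vars_alt
  rw [PySem.List.foldl_append_singleton_eq_map]
  simp [pv_name_eq]
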